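-- pv_equiv track=rewrite | github.com/arthurwkm/leetcode_75 | determine_if_two_strings_are_close.py | determineIfClose
-- ===== SOURCE A (Python) =====
-- def determineIfClose(word1, word2):
--     if len(word1) != len(word2):
--         return False
--
--     w1 = {}
--     w2 = {}
--
--     for i in word1:
--         if i in w1:
--             w1[i] += 1
--         else:
--             w1[i] = 1
--
--     for i in word2:
--         if i in w2:
--             w2[i] += 1
--         else:
--             w2[i] = 1
--
--     if w1 == w2:
--         return True
--     elif w1.keys() != w2.keys():
--         return False
--     else:
--         occurencies1 = {}
--         occurencies2 = {}
--
--         for i in w1: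
--             if w1[i] in occurencies1:
--                 occurencies1[w1[i]] += 1
--             else:
--                 occurencies1[w1[i]] = 1
--
--         for i in w2:
--             if w2[i] in occurencies2:
--                 occurencies2[w2[i]] += 1
--             else:
--                 occurencies2[w2[i]] = 1
--
--         if occurencies1 == occurencies2:
--             return True
--         else:
--             return False
-- ===== SOURCE B (Python) =====
-- def determineIfClose(word1, word2):
--     c1 = {}
--     for ch in word1:
--         c1[ch] = c1.get(ch, 0) + 1
--     c2 = {}
--     for ch in word2:
--         c2[ch] = c2.get(ch, 0) + 1
--     return set(word1) == set(word2) and sorted(c1.values()) == sorted(c2.values())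
-- ===== Notes on version B (the rewrite author's own statement) =====
-- stated objective: simpler
-- what changed: B compares the sorted lists of character counts directly (sorted(c1.values()) == sorted(c2.values())) together with set equality of the characters, replacing A's length guard, dict-equality fast path, key comparison and the two explicit frequency-of-frequency histogram dicts with one boolean expression.
import Mathlib
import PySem

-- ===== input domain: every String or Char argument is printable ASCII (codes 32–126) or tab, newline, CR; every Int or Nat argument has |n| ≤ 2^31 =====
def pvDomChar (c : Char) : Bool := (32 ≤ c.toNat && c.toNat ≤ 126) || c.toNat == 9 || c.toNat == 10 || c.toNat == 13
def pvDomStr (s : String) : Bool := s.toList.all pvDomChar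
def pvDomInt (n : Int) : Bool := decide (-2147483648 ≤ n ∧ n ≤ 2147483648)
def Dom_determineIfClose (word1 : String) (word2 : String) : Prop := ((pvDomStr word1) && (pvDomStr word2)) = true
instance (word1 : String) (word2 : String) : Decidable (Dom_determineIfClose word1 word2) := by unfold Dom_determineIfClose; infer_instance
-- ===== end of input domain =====

-- B replaces A's length guard, dict-equality fast path, key-set test and frequency-of-frequency
-- histogram dicts by one boolean expression comparing sorted count lists (objective: simpler).

-- ===== PORT A =====
-- Python dict `==` ignores insertion order: keys compared as a set, then the lookups.
def pyDictEq {κ ν : Type} [BEq κ] [BEq ν] (d1 d2 : PySem.Dict κ ν) : Bool :=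
  PySem.Set.equal d1.keys d2.keys && d1.keys.all (fun k => d1.get? k == d2.get? k)

-- the two `for i in wordN:` counting loops of A
def countLoop (l : List Char) : PySem.Dict Char Int :=
  l.foldl (fun d x => if d.contains x then d.insert x (d.getD x 0 + 1) else d.insert x 1)
    PySem.Dict.empty

-- the two `for i in wN:` occurrence-histogram loops of A (iteration over a dict = its keys in insertion order)
def occLoop (w : PySem.Dict Char Int) : PySem.Dict Int Int :=
  w.keys.foldl
    (fun d k =>
      if d.contains (w.getD k 0) then d.insert (w.getD k 0) (d.getD (w.getD k 0) 0 + 1)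
      else d.insert (w.getD k 0) 1)
    PySem.Dict.empty

def determineIfClose (word1 : String) (word2 : String) : Bool :=
  if PySem.Str.len word1 ≠ PySem.Str.len word2 then false
  else
    let w1 := countLoop word1.toList
    let w2 := countLoop word2.toList
    if pyDictEq w1 w2 then true
    else if !(PySem.Set.equal w1.keys w2.keys) then false
    else
      let o1 := occLoop w1
      let o2 := occLoop w2
      if pyDictEq o1 o2 then true else false

-- ===== PORT B =====
def determineIfClose_alt (word1 : String) (word2 : String) : Bool :=
  let c1 : PySem.Dict Char Int :=
    word1.toList.foldl (fun d ch => d.insert ch (d.getD ch 0 + 1)) PySem.Dict.empty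
  let c2 : PySem.Dict Char Int :=
    word2.toList.foldl (fun d ch => d.insert ch (d.getD ch 0 + 1)) PySem.Dict.empty
  PySem.Set.equal (PySem.Set.ofList word1.toList) (PySem.Set.ofList word2.toList)
    && (PySem.List.sorted c1.values (fun x => x) false
        == PySem.List.sorted c2.values (fun x => x) false)

-- ===== PRECONDITION & SPEC =====
def Spec_determineIfClose (word1 : String) (word2 : String) (out : Bool) : Prop := out = determineIfClose_alt word1 word2
instance (word1 : String) (word2 : String) (out : Bool) : Decidable (Spec_determineIfClose word1 word2 out) := by unfold Spec_determineIfClose; infer_instance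

-- ===== CLAIM (what is proved, stated in full; the proofs are below) =====
def Claim_equal_determineIfClose : Prop := ∀ (word1 : String) (word2 : String), Dom_determineIfClose word1 word2 → Spec_determineIfClose word1 word2 (determineIfClose word1 word2)

-- ===== LEMMAS AND PROOFS =====

theorem countLoop_eq_counter (l : List Char) : countLoop l = PySem.Dict.counter l := by
  unfold countLoop
  have h : (fun (d : PySem.Dict Char Int) x =>
      if d.contains x then d.insert x (d.getD x 0 + 1) else d.insert x 1)
      = (fun (d : PySem.Dict Char Int) x => d.insert x (d.getD x 0 + 1)) := by
    funext d x
    by_cases hc : d.contains x = true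
    · simp [hc]
    · have h0 := PySem.Dict.getD_of_not_contains d (0 : Int) (by simpa using hc)
      simp [hc, h0]
  rw [h, PySem.Dict.foldl_insert_getD_add_one_eq_counter]

theorem get?_counter {κ : Type} [BEq κ] [LawfulBEq κ] (l : List κ) (k : κ) :
    (PySem.Dict.counter l).get? k = if k ∈ l then some ((l.count k : Int)) else none := by
  by_cases h : k ∈ l
  · have hc : (PySem.Dict.counter l).contains k = true := by
      simp [PySem.Dict.contains_counter, h]
    have hs : ((PySem.Dict.counter l).get? k).isSome := by
      rw [← PySem.Dict.contains_eq_isSome_get?]; exact hc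
    obtain ⟨v, hv⟩ := Option.isSome_iff_exists.1 hs
    have hd : (some v).getD (0 : Int) = ((List.count k l : Nat) : Int) := by
      rw [← hv, ← PySem.Dict.getD_eq_get?_getD]
      exact PySem.Dict.getD_counter l k
    simp only [Option.getD_some] at hd
    rw [hv, if_pos h, hd]
  · have hc : (PySem.Dict.counter l).contains k = false := by
      simp [PySem.Dict.contains_counter, h]
    rw [if_neg h, (PySem.Dict.get?_eq_none_iff_contains _ _).2 hc]

theorem pyDictEq_counter {κ : Type} [BEq κ] [LawfulBEq κ] (a b : List κ) :
    pyDictEq (PySem.Dict.counter a) (PySem.Dict.counter b) = true ↔ a.Perm b := by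
  unfold pyDictEq
  rw [Bool.and_eq_true, PySem.Set.equal_iff, List.all_eq_true]
  simp only [PySem.Dict.keys_counter, PySem.Set.mem_ofList, get?_counter]
  constructor
  · rintro ⟨hmem, hcnt⟩
    rw [List.perm_iff_count]
    intro x
    by_cases hx : x ∈ a
    · have hxb : x ∈ b := (hmem x).1 hx
      have := hcnt x hx
      simp [hx, hxb] at this
      exact_mod_cast this
    · have hxb : x ∉ b := fun h => hx ((hmem x).2 h)
      simp [List.count_eq_zero.2 hx, List.count_eq_zero.2 hxb]
  · intro hp
    refine ⟨fun x => hp.mem_iff, fun x hx => ?_⟩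
    simp [hx, hp.mem_iff.1 hx, hp.count_eq]

theorem occLoop_eq (w : PySem.Dict Char Int) (h : w.keys.Nodup) :
    occLoop w = PySem.Dict.counter w.values := by
  unfold occLoop
  have hfun : (fun (d : PySem.Dict Int Int) k =>
      if d.contains (w.getD k 0) then d.insert (w.getD k 0) (d.getD (w.getD k 0) 0 + 1)
      else d.insert (w.getD k 0) 1)
      = (fun (d : PySem.Dict Int Int) k => d.insert (w.getD k 0) (d.getD (w.getD k 0) 0 + 1)) := by
    funext d k
    by_cases hc : d.contains (w.getD k 0) = true
    · simp [hc]
    · have h0 := PySem.Dict.getD_of_not_contains d (0 : Int) (by simpa using hc)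
      simp [hc, h0]
  rw [hfun]
  rw [show (w.keys.foldl (fun (d : PySem.Dict Int Int) k =>
        d.insert (w.getD k 0) (d.getD (w.getD k 0) 0 + 1)) PySem.Dict.empty)
      = ((w.keys.map (fun k => w.getD k 0)).foldl
          (fun (d : PySem.Dict Int Int) v => d.insert v (d.getD v 0 + 1)) PySem.Dict.empty) from
      (@List.foldl_map Char Int (PySem.Dict Int Int) (fun k => w.getD k 0)
        (fun d v => d.insert v (d.getD v 0 + 1)) w.keys PySem.Dict.empty).symm]
  rw [PySem.Dict.foldl_insert_getD_add_one_eq_counter, ← PySem.Dict.values_eq_map_keys w h 0]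

theorem counter_values_eq {κ : Type} [BEq κ] [LawfulBEq κ] (l : List κ) :
    (PySem.Dict.counter l).values = (PySem.Set.ofList l).map (fun k => ((l.count k : Nat) : Int)) := by
  rw [PySem.Dict.values_eq_map_keys _ (PySem.Dict.nodup_keys_counter l) 0, PySem.Dict.keys_counter]
  exact List.map_congr_left fun x _ => PySem.Dict.getD_counter l x

theorem ofList_perm_of_perm {κ : Type} [BEq κ] [LawfulBEq κ] {a b : List κ} (hp : a.Perm b) :
    (PySem.Set.ofList a).Perm (PySem.Set.ofList b) := by
  refine (List.perm_ext_iff_of_nodup (PySem.Set.nodup_ofList a) (PySem.Set.nodup_ofList b)).2 ?_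
  intro x; simp [PySem.Set.mem_ofList, hp.mem_iff]

theorem counter_values_perm {κ : Type} [BEq κ] [LawfulBEq κ] {a b : List κ} (hp : a.Perm b) :
    (PySem.Dict.counter a).values.Perm (PySem.Dict.counter b).values := by
  rw [counter_values_eq, counter_values_eq]
  have h1 : (PySem.Set.ofList a).map (fun k => ((a.count k : Nat) : Int))
      = (PySem.Set.ofList a).map (fun k => ((b.count k : Nat) : Int)) :=
    List.map_congr_left fun x _ => by rw [hp.count_eq]
  rw [h1]
  exact (ofList_perm_of_perm hp).map _

theorem counter_values_sum (l : List Char) :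
    (PySem.Dict.counter l).values.sum = (l.length : Int) := by
  rw [counter_values_eq]
  have hperm : (PySem.Set.ofList l).Perm l.dedup := by
    refine (List.perm_ext_iff_of_nodup (PySem.Set.nodup_ofList l) l.nodup_dedup).2 ?_
    intro x; simp [PySem.Set.mem_ofList, List.mem_dedup]
  rw [List.Perm.sum_eq (hperm.map _)]
  rw [show (fun k => ((l.count k : Nat) : Int)) = (fun (n : Nat) => (n : Int)) ∘ (fun k => l.count k) from rfl]
  rw [← List.map_map, ← Nat.cast_list_sum, List.sum_map_count_dedup_eq_length]

theorem sorted_beq_iff (a b : List Int) :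
    (PySem.List.sorted a (fun x => x) false == PySem.List.sorted b (fun x => x) false) = true ↔ a.Perm b := by
  rw [beq_iff_eq, PySem.List.sorted_id_eq_sorted_id_iff_perm]

-- B, rewritten through counter
theorem alt_eq (word1 word2 : String) :
    determineIfClose_alt word1 word2
      = (PySem.Set.equal (PySem.Set.ofList word1.toList) (PySem.Set.ofList word2.toList)
        && (PySem.List.sorted (PySem.Dict.counter word1.toList).values (fun x => x) false
            == PySem.List.sorted (PySem.Dict.counter word2.toList).values (fun x => x) false)) := by
  rfl

-- ===== VERDICT (by name: the statement is the Claim_ definition above) =====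
theorem determineIfClose_spec : Claim_equal_determineIfClose := by
  intro word1 word2 _
  unfold Spec_determineIfClose
  rw [alt_eq]
  simp only [determineIfClose, countLoop_eq_counter]
  by_cases hlen : PySem.Str.len word1 ≠ PySem.Str.len word2
  · rw [if_pos hlen]
    rcases hs : (PySem.List.sorted (PySem.Dict.counter word1.toList).values (fun x => x) false
        == PySem.List.sorted (PySem.Dict.counter word2.toList).values (fun x => x) false) with _ | _
    · rw [Bool.and_false]
    · exfalso
      have hperm := (sorted_beq_iff _ _).1 hs
      have hsum := hperm.sum_eq
      rw [counter_values_sum, counter_values_sum] at hsum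
      rw [PySem.Str.len_eq word1, PySem.Str.len_eq word2] at hlen
      exact hlen (by exact_mod_cast hsum)
  · rw [if_neg hlen]
    by_cases hfast : pyDictEq (PySem.Dict.counter word1.toList) (PySem.Dict.counter word2.toList) = true
    · rw [if_pos hfast]
      have hp := (pyDictEq_counter _ _).1 hfast
      have h1 : PySem.Set.equal (PySem.Set.ofList word1.toList) (PySem.Set.ofList word2.toList) = true := by
        rw [PySem.Set.equal_iff]; intro x; simp [PySem.Set.mem_ofList, hp.mem_iff]
      have h2 := (sorted_beq_iff _ _).2 (counter_values_perm hp)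
      rw [h1, h2]; rfl
    · rw [if_neg hfast]
      rcases hk : PySem.Set.equal (PySem.Dict.counter word1.toList).keys
          (PySem.Dict.counter word2.toList).keys with _ | _
      · -- key sets differ: both sides false
        have h1 : PySem.Set.equal (PySem.Set.ofList word1.toList) (PySem.Set.ofList word2.toList) = false := by
          rw [← PySem.Dict.keys_counter word1.toList, ← PySem.Dict.keys_counter word2.toList]; exact hk
        rw [h1]
        simp
      · -- key sets agree: A's histogram test = B's sorted-values test
        have h1 : PySem.Set.equal (PySem.Set.ofList word1.toList) (PySem.Set.ofList word2.toList) = true := by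
          rw [← PySem.Dict.keys_counter word1.toList, ← PySem.Dict.keys_counter word2.toList]; exact hk
        rw [occLoop_eq _ (PySem.Dict.nodup_keys_counter word1.toList),
            occLoop_eq _ (PySem.Dict.nodup_keys_counter word2.toList)]
        rcases hoc : pyDictEq (PySem.Dict.counter (PySem.Dict.counter word1.toList).values)
            (PySem.Dict.counter (PySem.Dict.counter word2.toList).values) with _ | _
        · have hnp : ¬ (PySem.Dict.counter word1.toList).values.Perm
              (PySem.Dict.counter word2.toList).values := by
            intro hp
            rw [← pyDictEq_counter] at hp
            rw [hoc] at hp; exact Bool.false_ne_true hp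
          rcases hs : (PySem.List.sorted (PySem.Dict.counter word1.toList).values (fun x => x) false
              == PySem.List.sorted (PySem.Dict.counter word2.toList).values (fun x => x) false) with _ | _
          · simp
          · exact absurd ((sorted_beq_iff _ _).1 hs) hnp
        · have hp := (pyDictEq_counter _ _).1 hoc
          have h2 := (sorted_beq_iff _ _).2 hp
          rw [h1, h2]
          simp
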